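-- pv_equiv track=rewrite | github.com/cherianb59/CS_Dash | cs_baseline.py | coc2
-- ===== SOURCE A (Python) =====
-- default_income_bands  = [40594,81188,121782,162376,202970]
--
-- default_tapers =  {}
--
-- def coc2(kids_12l,kids_13p, income, income_bands= default_income_bands, tapers=default_tapers ) :
--
--   #cap num kids at 3
--   num_kids  = min(kids_12l + kids_13p,3)
--
--   if (kids_12l == 0 and kids_13p == 0) : return(0)
--   if (kids_12l>0 and kids_13p == 0) : ages =  "12l"
--   elif (kids_12l == 0 and kids_13p > 0) : ages =  "13p"
--   elif (kids_12l > 0 and kids_13p > 0) : ages =  "mix"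
--   else : ages =  "err"
--
--   cost = 0
--   prev_band = 0
--   i = 0
--   #find index of  income
--   for band in income_bands:
--     #if we reach the relevant band calculate the remaining costs
--     if (income <= band) :
--       cost = cost + (income - prev_band) * tapers[ages,num_kids][i]
--       return(cost)
--
--     #otherwise use the whole income band to calculate the cost
--     cost = cost + (band - prev_band) * tapers[ages,num_kids][i]
--
--     i = i+1
--     prev_band = band
--
--   return(cost)
-- ===== SOURCE B (Python) =====
-- default_income_bands  = [40594,81188,121782,162376,202970]
--
-- default_tapers =  {}
--
-- def coc2(kids_12l, kids_13p, income, income_bands=default_income_bands, tapers=default_tapers):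
--     # Binary-search (hand-rolled bisect_left) the band containing income, then
--     # closed-form prefix sum of full-band width x rate plus one partial term.
--     if kids_12l == 0 and kids_13p == 0:
--         return 0
--     num_kids = min(kids_12l + kids_13p, 3)
--     if kids_13p == 0:
--         ages = "12l" if kids_12l > 0 else "err"
--     elif kids_13p > 0:
--         ages = "mix" if kids_12l > 0 else ("13p" if kids_12l == 0 else "err")
--     else:
--         ages = "err"
--     if not income_bands:
--         return 0
--     t = tapers[ages, num_kids]
--     lo, hi = 0, len(income_bands)
--     while lo < hi:
--         mid = (lo + hi) // 2
--         if income_bands[mid] < income: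
--             lo = mid + 1
--         else:
--             hi = mid
--     idx = lo
--     edges = [0] + income_bands
--     cost = sum((income_bands[i] - edges[i]) * t[i] for i in range(idx))
--     if idx < len(income_bands):
--         cost += (income - edges[idx]) * t[idx]
--     return cost
-- ===== Notes on version B (the rewrite author's own statement) =====
-- stated objective: alternative
-- what changed: B replaces A's sequential accumulator loop (cost/prev_band/i threaded through every band) by a hand-rolled bisect_left binary search that locates the band containing income, followed by a closed-form prefix sum of full-band widths times rates plus one partial term; Pre_ additionally requires income_bands to be nondecreasing, on which A's linear first-match and B's binary search coincide.
-- outside the precondition, e.g. on coc2(1, 0, 60, [100, 50], {('12l', 1): [2, 3]}): A returns 120, B returns 50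
import Mathlib
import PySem

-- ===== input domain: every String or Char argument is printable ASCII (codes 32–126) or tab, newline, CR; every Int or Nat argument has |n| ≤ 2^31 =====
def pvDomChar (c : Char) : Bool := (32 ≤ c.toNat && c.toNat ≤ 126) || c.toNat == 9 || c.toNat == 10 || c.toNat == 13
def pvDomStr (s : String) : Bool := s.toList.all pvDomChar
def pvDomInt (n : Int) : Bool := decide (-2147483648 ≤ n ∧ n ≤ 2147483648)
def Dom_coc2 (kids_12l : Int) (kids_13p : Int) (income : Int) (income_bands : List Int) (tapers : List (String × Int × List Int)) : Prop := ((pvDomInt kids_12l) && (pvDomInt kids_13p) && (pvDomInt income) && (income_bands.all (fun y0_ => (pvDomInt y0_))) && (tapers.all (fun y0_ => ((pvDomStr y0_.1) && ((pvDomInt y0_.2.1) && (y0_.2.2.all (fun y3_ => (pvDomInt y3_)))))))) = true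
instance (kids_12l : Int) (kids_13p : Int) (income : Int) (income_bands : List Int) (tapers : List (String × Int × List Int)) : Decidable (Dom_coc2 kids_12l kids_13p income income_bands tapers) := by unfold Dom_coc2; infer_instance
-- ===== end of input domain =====

-- B replaces A's sequential accumulator loop by a bisect_left-style binary search for
-- the band containing income plus a closed-form prefix sum (objective: alternative).

-- shared lookup of tapers[(ages, num_kids)] (Python dict lookup; first match)
def tapersGet? (tapers : List (String × Int × List Int)) (ages : String) (n : Int) : Option (List Int) :=
  (tapers.find? (fun p => p.1 == ages && p.2.1 == n)).map (·.2.2)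

-- ===== PORT A =====
-- A's for-loop (cost/prev_band/i state); tapers[…][i] totalized by getD 0 — Pre_coc2
-- excludes the inputs where Python raises (KeyError/IndexError), so it is exact on Pre_.
def coc2LoopA (income : Int) (t : List Int) : List Int → Int → Int → Nat → Int
  | [], cost, _, _ => cost
  | band :: rest, cost, prev, i =>
    if income ≤ band then cost + (income - prev) * t.getD i 0
    else coc2LoopA income t rest (cost + (band - prev) * t.getD i 0) band (i + 1)

def coc2 (kids_12l : Int) (kids_13p : Int) (income : Int) (income_bands : List Int) (tapers : List (String × Int × List Int)) : Int :=
  let num_kids := min (kids_12l + kids_13p) 3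
  if kids_12l = 0 ∧ kids_13p = 0 then 0
  else
    let ages := if kids_12l > 0 ∧ kids_13p = 0 then "12l"
      else if kids_12l = 0 ∧ kids_13p > 0 then "13p"
      else if kids_12l > 0 ∧ kids_13p > 0 then "mix"
      else "err"
    let t := (tapersGet? tapers ages num_kids).getD []
    coc2LoopA income t income_bands 0 0 0

-- ===== PORT B =====
-- Source B's while-loop bisect_left; indices it reads are always in range, so getD 0 is exact.
-- the while loop runs with fuel = hi - lo decreasing; fuel = bands.length suffices
def bsearchB (income : Int) (bands : List Int) : Nat → Nat → Nat → Nat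
  | 0, lo, _ => lo
  | fuel + 1, lo, hi =>
    if lo < hi then
      if bands.getD ((lo + hi) / 2) 0 < income then bsearchB income bands fuel ((lo + hi) / 2 + 1) hi
      else bsearchB income bands fuel lo ((lo + hi) / 2)
    else lo

-- Source B's main body: guards, taper fetch, binary search, prefix sum + partial term;
-- t[i]/edges[idx] totalized by getD 0 (exact on Pre_, as in port A).
def coc2_alt (kids_12l : Int) (kids_13p : Int) (income : Int) (income_bands : List Int) (tapers : List (String × Int × List Int)) : Int :=
  if kids_12l = 0 ∧ kids_13p = 0 then 0
  else
    let num_kids := min (kids_12l + kids_13p) 3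
    let ages := if kids_13p = 0 then (if kids_12l > 0 then "12l" else "err")
      else if kids_13p > 0 then (if kids_12l > 0 then "mix" else if kids_12l = 0 then "13p" else "err")
      else "err"
    if income_bands = [] then 0
    else
      let t := (tapersGet? tapers ages num_kids).getD []
      let idx := bsearchB income income_bands income_bands.length 0 income_bands.length
      let edges := 0 :: income_bands
      let cost := ((List.range idx).map (fun i => (income_bands.getD i 0 - edges.getD i 0) * t.getD i 0)).sum
      if idx < income_bands.length then cost + (income - edges.getD idx 0) * t.getD idx 0 else cost

-- ===== PRECONDITION & SPEC =====
-- Pre_ excludes (a) the inputs where Python A raises — a missing tapers key (KeyError)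
-- or a taper list shorter than the band indices reached (IndexError) — and (b) inputs
-- whose income_bands are not nondecreasing, on which A's early-exit value at the first
-- band ≥ income in scan order is an accident of scan order (a malformed band schedule);
-- B's binary search does the natural thing there.
def Pre_coc2 (kids_12l : Int) (kids_13p : Int) (income : Int) (income_bands : List Int) (tapers : List (String × Int × List Int)) : Prop :=
  (kids_12l = 0 ∧ kids_13p = 0) ∨ income_bands = [] ∨
  (income_bands.Pairwise (· ≤ ·) ∧
   (let num_kids := min (kids_12l + kids_13p) 3
    let ages := if kids_12l > 0 ∧ kids_13p = 0 then "12l"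
      else if kids_12l = 0 ∧ kids_13p > 0 then "13p"
      else if kids_12l > 0 ∧ kids_13p > 0 then "mix"
      else "err"
    let need := match income_bands.findIdx? (fun b => decide (income ≤ b)) with
      | some j => j + 1
      | none => income_bands.length
    (tapersGet? tapers ages num_kids).isSome = true ∧
    need ≤ ((tapersGet? tapers ages num_kids).getD []).length))
instance (kids_12l : Int) (kids_13p : Int) (income : Int) (income_bands : List Int) (tapers : List (String × Int × List Int)) : Decidable (Pre_coc2 kids_12l kids_13p income income_bands tapers) := by unfold Pre_coc2; infer_instance

def pvWitness_coc2 : Int × Int × Int × List Int × (List (String × Int × List Int)) :=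
  (1, 0, 50, [100, 200], [("12l", 1, [2, 3])])

def Spec_coc2 (kids_12l : Int) (kids_13p : Int) (income : Int) (income_bands : List Int) (tapers : List (String × Int × List Int)) (out : Int) : Prop := out = coc2_alt kids_12l kids_13p income income_bands tapers
instance (kids_12l : Int) (kids_13p : Int) (income : Int) (income_bands : List Int) (tapers : List (String × Int × List Int)) (out : Int) : Decidable (Spec_coc2 kids_12l kids_13p income income_bands tapers out) := by unfold Spec_coc2; infer_instance

-- ===== CLAIM (what is proved, stated in full; the proofs are below) =====
def Claim_equal_coc2 : Prop := ∀ (kids_12l : Int) (kids_13p : Int) (income : Int) (income_bands : List Int) (tapers : List (String × Int × List Int)), Dom_coc2 kids_12l kids_13p income income_bands tapers → Pre_coc2 kids_12l kids_13p income income_bands tapers → Spec_coc2 kids_12l kids_13p income income_bands tapers (coc2 kids_12l kids_13p income income_bands tapers)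

-- ===== LEMMAS AND PROOFS =====

-- common value both computations equal: structural recursion over the bands
def bandsVal (income : Int) : List Int → List Int → Int → Int
  | [], _, _ => 0
  | b :: rest, t, prev =>
    if income ≤ b then (income - prev) * t.getD 0 0
    else (b - prev) * t.getD 0 0 + bandsVal income rest t.tail b

theorem getD_drop_zero (t : List Int) (i : Nat) : (t.drop i).getD 0 0 = t.getD i 0 := by
  simp [List.getD, List.getElem?_drop]

theorem getD_tail (t : List Int) (j : Nat) : t.tail.getD j 0 = t.getD (j + 1) 0 := by
  cases t <;> simp [List.getD]

theorem loopA_eq (income : Int) (bands : List Int) : ∀ (t : List Int) (cost prev : Int) (i : Nat),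
    coc2LoopA income t bands cost prev i = cost + bandsVal income bands (t.drop i) prev := by
  induction bands with
  | nil => intro t cost prev i; simp [coc2LoopA, bandsVal]
  | cons b rest ih =>
    intro t cost prev i
    by_cases h : income ≤ b
    · simp [coc2LoopA, bandsVal, h]
    · simp only [coc2LoopA, bandsVal, if_neg h, ih]
      rw [List.tail_drop, getD_drop_zero]
      ring

theorem getD_mono (bands : List Int) (hs : bands.Pairwise (· ≤ ·)) (i j : Nat)
    (hij : i ≤ j) (hj : j < bands.length) : bands.getD i 0 ≤ bands.getD j 0 := by
  rcases Nat.eq_or_lt_of_le hij with h | h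
  · subst h; exact le_refl _
  · have := (List.pairwise_iff_getElem.mp hs) i j (lt_trans h hj) hj h
    rwa [List.getD_eq_getElem bands 0 (lt_trans h hj), List.getD_eq_getElem bands 0 hj]

theorem bsearchB_spec (income : Int) (bands : List Int) (hs : bands.Pairwise (· ≤ ·)) :
    ∀ (n lo hi : Nat), hi - lo ≤ n → lo ≤ hi → hi ≤ bands.length →
    (∀ k, k < lo → bands.getD k 0 < income) →
    (∀ k, hi ≤ k → k < bands.length → income ≤ bands.getD k 0) →
    bsearchB income bands n lo hi ≤ bands.length ∧
    (∀ k, k < bsearchB income bands n lo hi → bands.getD k 0 < income) ∧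
    (∀ k, bsearchB income bands n lo hi ≤ k → k < bands.length → income ≤ bands.getD k 0) := by
  intro n
  induction n with
  | zero =>
    intro lo hi hn hlh hhi hpre hpost
    have hle : lo = hi := by omega
    simp only [bsearchB]
    exact ⟨by omega, hpre, fun k hk hkl => hpost k (by omega) hkl⟩
  | succ m ih =>
    intro lo hi hn hlh hhi hpre hpost
    by_cases hlt : lo < hi
    · simp only [bsearchB, if_pos hlt]
      by_cases hm : bands.getD ((lo + hi) / 2) 0 < income
      · rw [if_pos hm]
        refine ih ((lo + hi) / 2 + 1) hi (by omega) (by omega) hhi ?_ hpost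
        intro k hk
        exact lt_of_le_of_lt (getD_mono bands hs k ((lo + hi) / 2) (by omega) (by omega)) hm
      · rw [if_neg hm]
        refine ih lo ((lo + hi) / 2) (by omega) (by omega) (by omega) hpre ?_
        intro k hk hkl
        exact le_trans (Int.not_lt.mp hm) (getD_mono bands hs ((lo + hi) / 2) k hk hkl)
    · simp only [bsearchB, if_neg hlt]
      exact ⟨by omega, hpre, fun k hk hkl => hpost k (by omega) hkl⟩

-- B's staged value (prefix sum + partial) equals the band recursion, given that r is
-- a correct split point.
theorem staged_eq (income : Int) : ∀ (bands t : List Int) (prev : Int) (r : Nat),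
    r ≤ bands.length →
    (∀ k, k < r → bands.getD k 0 < income) →
    (r < bands.length → income ≤ bands.getD r 0) →
    ((List.range r).map (fun i => (bands.getD i 0 - (prev :: bands).getD i 0) * t.getD i 0)).sum
      + (if r < bands.length then (income - (prev :: bands).getD r 0) * t.getD r 0 else 0)
    = bandsVal income bands t prev := by
  intro bands
  induction bands with
  | nil =>
    intro t prev r hr _ _
    obtain rfl : r = 0 := Nat.le_zero.mp (by simpa using hr)
    simp [bandsVal]
  | cons b rest ih =>
    intro t prev r hr hlt hge
    cases r with
    | zero =>
      have hib : income ≤ b := by simpa [List.getD] using hge (by simp)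
      simp [bandsVal, hib, List.getD]
    | succ s =>
      have hb : b < income := by simpa [List.getD] using hlt 0 (by omega)
      have hnb : ¬ income ≤ b := by omega
      rw [List.range_succ_eq_map]
      simp only [List.map_cons, List.map_map, List.sum_cons, Function.comp_def]
      have hmap : ∀ i : Nat,
          ((b :: rest).getD (i + 1) 0 - (prev :: b :: rest).getD (i + 1) 0) * t.getD (i + 1) 0
          = (rest.getD i 0 - (b :: rest).getD i 0) * t.tail.getD i 0 := by
        intro i
        rw [getD_tail]
        simp [List.getD]
      have hrec := ih t.tail b s (by simpa using hr)
        (fun k hk => by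
          have := hlt (k + 1) (by omega)
          simpa [List.getD] using this)
        (fun hsr => by
          have := hge (by simpa using hsr)
          simpa [List.getD] using this)
      simp only [bandsVal, if_neg hnb]
      rw [show ((List.range s).map (fun i =>
            ((b :: rest).getD (i + 1) 0 - (prev :: b :: rest).getD (i + 1) 0) * t.getD (i + 1) 0)).sum
          = ((List.range s).map (fun i =>
            (rest.getD i 0 - (b :: rest).getD i 0) * t.tail.getD i 0)).sum from by
        congr 1; exact List.map_congr_left (fun i _ => hmap i)]
      have hpart : (if s + 1 < (b :: rest).length then
            (income - (prev :: b :: rest).getD (s + 1) 0) * t.getD (s + 1) 0 else 0)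
          = (if s < rest.length then (income - (b :: rest).getD s 0) * t.tail.getD s 0 else 0) := by
        by_cases hsl : s < rest.length
        · rw [if_pos (by simpa using Nat.succ_lt_succ hsl), if_pos hsl, getD_tail]
          simp [List.getD]
        · rw [if_neg (by simpa using fun h => hsl (Nat.lt_of_succ_lt_succ h)), if_neg hsl]
      rw [hpart, add_assoc, hrec]
      simp [List.getD]

theorem ages_eq (kids_12l kids_13p : Int) :
    (if kids_12l > 0 ∧ kids_13p = 0 then "12l"
      else if kids_12l = 0 ∧ kids_13p > 0 then "13p"
      else if kids_12l > 0 ∧ kids_13p > 0 then "mix"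
      else "err")
    = (if kids_13p = 0 then (if kids_12l > 0 then "12l" else "err")
      else if kids_13p > 0 then (if kids_12l > 0 then "mix" else if kids_12l = 0 then "13p" else "err")
      else "err") := by
  split_ifs <;> first | rfl | omega

-- ===== VERDICT (by name: the statement is the Claim_ definition above) =====
theorem coc2_spec : Claim_equal_coc2 := by
  intro kids_12l kids_13p income income_bands tapers _ hpre
  unfold Spec_coc2 coc2 coc2_alt
  by_cases hz : kids_12l = 0 ∧ kids_13p = 0
  · simp [hz]
  · rw [if_neg hz, if_neg hz]
    by_cases hnil : income_bands = []
    · subst hnil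
      simp [loopA_eq, bandsVal]
    · rw [if_neg hnil]
      have hs : income_bands.Pairwise (· ≤ ·) := by
        rcases hpre with h | h | h
        · exact absurd h hz
        · exact absurd h hnil
        · exact h.1
      rw [← ages_eq kids_12l kids_13p]
      have hb := bsearchB_spec income income_bands hs income_bands.length 0
        income_bands.length (by omega) (by omega) (le_refl _)
        (fun k hk => absurd hk (by omega)) (fun k hk hkl => absurd (lt_of_le_of_lt hk hkl) (lt_irrefl _))
      rw [loopA_eq]
      simp only [List.drop_zero, zero_add]
      rw [← staged_eq income income_bands _ 0 (bsearchB income income_bands income_bands.length 0 income_bands.length)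
        hb.1 hb.2.1 (fun h => hb.2.2 _ (le_refl _) h)]
      split_ifs <;> simp
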